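-- pv_equiv track=rewrite | github.com/masashi-y/depccg | depccg/super/py_utils.py | get_context_by_window
-- ===== SOURCE A (Python) =====
-- def get_context_by_window(items, window_size, lpad, rpad):
--     res = []
--     for i, item in enumerate(items):
--         context = []
--         if window_size - i > 0:
--             for j in range(window_size - i):
--                 context.append(lpad)
--             for j in range(i):
--                 context.append(items[j])
--         else:
--             for j in range(i - window_size, i):
--                 context.append(items[j])
--         context.append(item)
--         if i + window_size >= len(items):
--             for j in range(i + 1, len(items)):
--                 context.append(items[j])
--             for j in range(i + window_size - len(items) + 1):
--                 context.append(rpad)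
--         else:
--             for j in range(i + 1, i + window_size + 1):
--                 context.append(items[j])
--         assert len(context) == window_size * 2 + 1
--
--         res.append(context)
--     return res
-- ===== SOURCE B (Python) =====
-- def get_context_by_window(items, window_size, lpad, rpad):
--     padded = [lpad] * window_size + list(items) + [rpad] * window_size
--     width = 2 * window_size + 1
--     return [padded[i:i + width] for i in range(len(items))]
-- ===== Notes on version B (the rewrite author's own statement) =====
-- stated objective: simpler
-- what changed: B builds one padded sequence [lpad]*w + items + [rpad]*w once and takes a uniform slice padded[i:i+2w+1] per item, eliminating all four of A's boundary branches and six append loops; Pre_ excludes only negative window_size with non-empty items, where A's internal assert raises AssertionError.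
import Mathlib
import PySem

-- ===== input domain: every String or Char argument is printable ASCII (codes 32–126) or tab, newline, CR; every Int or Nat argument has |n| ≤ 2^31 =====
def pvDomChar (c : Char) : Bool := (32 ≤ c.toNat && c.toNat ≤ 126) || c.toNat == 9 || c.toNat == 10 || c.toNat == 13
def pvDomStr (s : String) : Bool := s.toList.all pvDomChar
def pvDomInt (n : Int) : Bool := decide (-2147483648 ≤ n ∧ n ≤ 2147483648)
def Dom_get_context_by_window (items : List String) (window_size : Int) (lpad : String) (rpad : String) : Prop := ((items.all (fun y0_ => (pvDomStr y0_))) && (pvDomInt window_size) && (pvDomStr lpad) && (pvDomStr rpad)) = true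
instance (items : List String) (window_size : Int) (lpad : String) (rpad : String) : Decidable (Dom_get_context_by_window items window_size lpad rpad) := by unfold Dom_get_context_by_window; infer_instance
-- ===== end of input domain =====

-- B replaces A's four boundary branches and six append loops by one padded list and a
-- uniform slice per position (objective: simpler; return values only, neither mutates).

-- ===== PORT A =====
-- Literal transliteration of A. Every items[j] read is in range wherever the loops run, so
-- pyGetD with a junk default is exact; the `assert` always succeeds inside Pre_ (the inputs
-- on which it fails, window_size < 0 with non-empty items, are exactly those Pre_ excludes).
def get_context_by_window (items : List String) (window_size : Int) (lpad : String) (rpad : String) : List (List String) :=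
  (PySem.List.enumerate items 0).foldl (fun res p =>
    let i := p.1
    let item := p.2
    let context : List String := []
    let context :=
      if window_size - i > 0 then
        let context := (PySem.List.pyRange 0 (window_size - i) 1).foldl (fun c _ => c ++ [lpad]) context
        (PySem.List.pyRange 0 i 1).foldl (fun c j => c ++ [PySem.List.pyGetD items j ""]) context
      else
        (PySem.List.pyRange (i - window_size) i 1).foldl (fun c j => c ++ [PySem.List.pyGetD items j ""]) context
    let context := context ++ [item]
    let context :=
      if i + window_size ≥ (items.length : Int) then
        let context := (PySem.List.pyRange (i + 1) (items.length : Int) 1).foldl (fun c j => c ++ [PySem.List.pyGetD items j ""]) context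
        (PySem.List.pyRange 0 (i + window_size - (items.length : Int) + 1) 1).foldl (fun c _ => c ++ [rpad]) context
      else
        (PySem.List.pyRange (i + 1) (i + window_size + 1) 1).foldl (fun c j => c ++ [PySem.List.pyGetD items j ""]) context
    res ++ [context]) []

-- ===== PORT B =====
def get_context_by_window_alt (items : List String) (window_size : Int) (lpad : String) (rpad : String) : List (List String) :=
  let padded := PySem.List.pyRepeat [lpad] window_size ++ items ++ PySem.List.pyRepeat [rpad] window_size
  let width := 2 * window_size + 1
  (PySem.List.pyRange 0 (items.length : Int) 1).map (fun i => PySem.List.slice padded (some i) (some (i + width)))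

-- ===== PRECONDITION & SPEC =====
-- Pre_ excludes only negative window_size with non-empty items: there A's `assert` fails (AssertionError).
def Pre_get_context_by_window (items : List String) (window_size : Int) (lpad : String) (rpad : String) : Prop :=
  0 ≤ window_size ∨ items = []
instance (items : List String) (window_size : Int) (lpad : String) (rpad : String) : Decidable (Pre_get_context_by_window items window_size lpad rpad) := by unfold Pre_get_context_by_window; infer_instance
def pvWitness_get_context_by_window : List String × Int × String × String := (["a", "b", "c"], 2, "<s>", "</s>")

def Spec_get_context_by_window (items : List String) (window_size : Int) (lpad : String) (rpad : String) (out : List (List String)) : Prop := out = get_context_by_window_alt items window_size lpad rpad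
instance (items : List String) (window_size : Int) (lpad : String) (rpad : String) (out : List (List String)) : Decidable (Spec_get_context_by_window items window_size lpad rpad out) := by unfold Spec_get_context_by_window; infer_instance

-- ===== CLAIM (what is proved, stated in full; the proofs are below) =====
def Claim_equal_get_context_by_window : Prop := ∀ (items : List String) (window_size : Int) (lpad : String) (rpad : String), Dom_get_context_by_window items window_size lpad rpad → Pre_get_context_by_window items window_size lpad rpad → Spec_get_context_by_window items window_size lpad rpad (get_context_by_window items window_size lpad rpad)

-- ===== LEMMAS AND PROOFS =====

theorem window_core (items : List String) (lpad rpad : String) (wn k : Nat) (hk : k < items.length) :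
    (if k < wn then List.replicate (wn - k) lpad ++ items.take k
     else (items.drop (k - wn)).take wn)
    ++ [items[k]]
    ++ (if items.length ≤ k + wn then items.drop (k+1) ++ List.replicate (k + wn + 1 - items.length) rpad
        else (items.drop (k+1)).take wn)
    = ((List.replicate wn lpad ++ items ++ List.replicate wn rpad).drop k).take (2*wn+1) := by
  have hcons : items.drop k = items[k] :: items.drop (k+1) := List.drop_eq_getElem_cons hk
  have hmid : items.take k ++ ([items[k]] ++ items.drop (k+1)) = items := by
    rw [List.singleton_append, ← hcons, List.take_append_drop]
  have htake : items.take (k+1) = items.take k ++ [items[k]] := by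
    rw [List.take_add, hcons]; rfl
  rw [List.append_assoc (List.replicate wn lpad)]
  by_cases h1 : k < wn
  · -- drop k stays inside the left padding
    rw [List.drop_append_of_le_length (by simp; omega), List.drop_replicate,
        List.take_append, List.take_replicate,
        show min (2*wn+1) (wn-k) = wn - k by omega]
    simp only [List.length_replicate]
    rw [show 2*wn+1 - (wn-k) = wn + k + 1 by omega, List.take_append]
    by_cases h2 : items.length ≤ k + wn
    · rw [List.take_of_length_le (l := items) (show items.length ≤ wn+k+1 by omega), List.take_replicate,
          show min (wn+k+1-items.length) wn = k + wn + 1 - items.length by omega,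
          if_pos h1, if_pos h2]
      simp only [List.append_assoc, List.singleton_append]
      rw [← List.cons_append, ← hcons,
          ← List.append_assoc (List.take k items) (List.drop k items), List.take_append_drop]
    · rw [show wn+k+1-items.length = 0 by omega, List.take_zero, List.append_nil,
          if_pos h1, if_neg h2,
          show wn+k+1 = k + (1 + wn) by omega, List.take_add,
          List.drop_eq_getElem_cons hk,
          show 1 + wn = wn + 1 by omega, List.take_succ_cons]
      simp only [List.append_assoc, List.singleton_append]
  · -- drop k goes past the left padding
    rw [List.drop_append, List.drop_replicate, show wn - k = 0 by omega]
    simp only [List.length_replicate, List.replicate_zero, List.nil_append]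
    rw [List.drop_append, show k - wn - items.length = 0 by omega, List.drop_zero,
        List.take_append]
    simp only [List.length_drop]
    by_cases h2 : items.length ≤ k + wn
    · rw [if_neg h1, if_pos h2,
          List.take_of_length_le (l := items.drop (k-wn)) (show (items.drop (k-wn)).length ≤ 2*wn+1 by simp; omega), List.take_replicate,
          show min (2*wn+1 - (items.length - (k - wn))) wn = k + wn + 1 - items.length by omega]
      have hsplit' : (items.drop (k-wn)).take wn ++ items.drop k = items.drop (k - wn) := by
        conv_rhs => rw [← List.take_append_drop wn (items.drop (k-wn))]
        rw [List.drop_drop, show k - wn + wn = k by omega]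
      simp only [List.append_assoc, List.singleton_append]
      rw [← List.cons_append, ← hcons, ← List.append_assoc, hsplit']
    · rw [if_neg h1, if_neg h2,
          show 2*wn+1 - (items.length - (k - wn)) = 0 by omega, List.take_zero, List.append_nil,
          show 2*wn+1 = wn + (1 + wn) by omega, List.take_add,
          List.drop_drop, show k - wn + wn = k by omega,
          List.drop_eq_getElem_cons hk,
          show 1 + wn = wn + 1 by omega, List.take_succ_cons]
      simp only [List.append_assoc, List.cons_append, List.nil_append]

theorem map_get_segment (xs : List String) (a b : Int) (h0 : 0 ≤ a) (hab : a ≤ b) (hb : b ≤ (xs.length : Int)) :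
    (PySem.List.pyRange a b 1).map (fun j => PySem.List.pyGetD xs j "") = (xs.drop a.toNat).take (b.toNat - a.toNat) := by
  have h1 := PySem.List.map_pyGetD_pyRange (xs := xs) (a := a) (d := "") h0
  have hsplit := PySem.List.pyRange_one_append a b ((xs.length : Int)) hab hb
  have hlen : ((PySem.List.pyRange a b 1).map (fun j => PySem.List.pyGetD xs j "")).length = b.toNat - a.toNat := by
    simp [PySem.List.length_pyRange_one]; omega
  simp only [PySem.List.len_eq] at h1
  rw [← h1, hsplit, List.map_append, ← hlen, List.take_left]

def ctxA (items : List String) (w : Int) (lpad rpad : String) (i : Int) (item : String) : List String :=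
  (if w - i > 0 then
      List.replicate (w - i).toNat lpad ++ (PySem.List.pyRange 0 i 1).map (fun j => PySem.List.pyGetD items j "")
    else (PySem.List.pyRange (i - w) i 1).map (fun j => PySem.List.pyGetD items j ""))
  ++ [item]
  ++ (if i + w ≥ (items.length : Int) then
        (PySem.List.pyRange (i + 1) (items.length : Int) 1).map (fun j => PySem.List.pyGetD items j "")
          ++ List.replicate (i + w - (items.length : Int) + 1).toNat rpad
      else (PySem.List.pyRange (i + 1) (i + w + 1) 1).map (fun j => PySem.List.pyGetD items j ""))

theorem ctxA_eq_slice (items : List String) (w : Int) (lpad rpad : String) (i : Int)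
    (hw : 0 ≤ w) (h0 : 0 ≤ i) (hn : i < (items.length : Int)) :
    ctxA items w lpad rpad i (PySem.List.pyGetD items i "") =
    PySem.List.slice (PySem.List.pyRepeat [lpad] w ++ items ++ PySem.List.pyRepeat [rpad] w)
      (some i) (some (i + (2 * w + 1))) := by
  have hk : i.toNat < items.length := by omega
  have hcore := window_core items lpad rpad w.toNat i.toNat hk
  unfold ctxA
  rw [PySem.List.pyRepeat_singleton, PySem.List.pyRepeat_singleton,
      PySem.List.slice_toNat _ h0 (by omega),
      show (i + (2 * w + 1)).toNat - i.toNat = 2 * w.toNat + 1 by omega,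
      PySem.List.pyGetD_eq_getElem items "" h0 hn]
  by_cases hA : w - i > 0
  · rw [if_pos hA, map_get_segment items 0 i le_rfl h0 (by omega)]
    simp only [List.drop_zero, Int.toNat_zero, Nat.sub_zero]
    by_cases hB : i + w ≥ (items.length : Int)
    · rw [if_pos hB, map_get_segment items (i+1) (items.length : Int) (by omega) (by omega) le_rfl,
          show ((items.length : Int)).toNat = items.length by omega,
          show (i+1).toNat = i.toNat + 1 by omega,
          show (i + w - (items.length : Int) + 1).toNat = i.toNat + w.toNat + 1 - items.length by omega,
          show (w - i).toNat = w.toNat - i.toNat by omega,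
          List.take_of_length_le (l := items.drop (i.toNat+1)) (i := items.length - (i.toNat+1)) (by simp)]
      rw [if_pos (show i.toNat < w.toNat by omega), if_pos (show items.length ≤ i.toNat + w.toNat by omega)] at hcore
      simpa only [List.append_assoc, List.cons_append, List.singleton_append] using hcore
    · rw [if_neg hB, map_get_segment items (i+1) (i+w+1) (by omega) (by omega) (by omega),
          show (i+1).toNat = i.toNat + 1 by omega,
          show (i + w + 1).toNat - (i.toNat + 1) = w.toNat by omega,
          show (w - i).toNat = w.toNat - i.toNat by omega]
      rw [if_pos (show i.toNat < w.toNat by omega), if_neg (show ¬ items.length ≤ i.toNat + w.toNat by omega)] at hcore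
      simpa only [List.append_assoc, List.cons_append, List.singleton_append] using hcore
  · rw [if_neg hA, map_get_segment items (i-w) i (by omega) (by omega) (by omega),
        show i.toNat - (i - w).toNat = w.toNat by omega,
        show (i - w).toNat = i.toNat - w.toNat by omega]
    by_cases hB : i + w ≥ (items.length : Int)
    · rw [if_pos hB, map_get_segment items (i+1) (items.length : Int) (by omega) (by omega) le_rfl,
          show ((items.length : Int)).toNat = items.length by omega,
          show (i+1).toNat = i.toNat + 1 by omega,
          show (i + w - (items.length : Int) + 1).toNat = i.toNat + w.toNat + 1 - items.length by omega,
          List.take_of_length_le (l := items.drop (i.toNat+1)) (i := items.length - (i.toNat+1)) (by simp)]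
      rw [if_neg (show ¬ i.toNat < w.toNat by omega), if_pos (show items.length ≤ i.toNat + w.toNat by omega)] at hcore
      simpa only [List.append_assoc, List.cons_append, List.singleton_append] using hcore
    · rw [if_neg hB, map_get_segment items (i+1) (i+w+1) (by omega) (by omega) (by omega),
          show (i+1).toNat = i.toNat + 1 by omega,
          show (i + w + 1).toNat - (i.toNat + 1) = w.toNat by omega]
      rw [if_neg (show ¬ i.toNat < w.toNat by omega), if_neg (show ¬ items.length ≤ i.toNat + w.toNat by omega)] at hcore
      simpa only [List.append_assoc, List.cons_append, List.singleton_append] using hcore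

theorem portA_eq_map (items : List String) (w : Int) (lpad rpad : String) :
    get_context_by_window items w lpad rpad = (PySem.List.enumerate items 0).map (fun p => ctxA items w lpad rpad p.1 p.2) := by
  unfold get_context_by_window ctxA
  simp only [PySem.List.foldl_append_singleton_eq_map,
    List.map_const', PySem.List.length_pyRange_one, List.nil_append, List.append_assoc]
  simp only [Int.sub_zero]
  congr 1
  funext p
  by_cases h : p.1 + w ≥ (items.length : Int) <;> simp [h]

theorem final (items : List String) (w : Int) (lpad rpad : String) (hPre : 0 ≤ w ∨ items = []) :
    get_context_by_window items w lpad rpad = get_context_by_window_alt items w lpad rpad := by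
  unfold get_context_by_window_alt
  rw [portA_eq_map, PySem.List.enumerate_eq_map_pyRange items "", List.map_map]
  simp only [PySem.List.len_eq]
  rcases hPre with hw | hnil
  · apply List.map_congr_left
    intro i hi
    rw [PySem.List.mem_pyRange_one] at hi
    exact ctxA_eq_slice items w lpad rpad i hw hi.1 hi.2
  · subst hnil
    rw [PySem.List.pyRange_one_eq_nil (by simp)]
    rfl

-- ===== VERDICT (by name: the statement is the Claim_ definition above) =====
theorem get_context_by_window_spec : Claim_equal_get_context_by_window := by
  intro items w lpad rpad _ hPre
  unfold Spec_get_context_by_window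
  exact final items w lpad rpad hPre
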